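-- pv_equiv track=rewrite | github.com/hacetheworld/competitive-programming-practices | problems/codeforce/800-1200/Birthday-Gift.py | Solution
-- ===== SOURCE A (Python) =====
-- def Solution(S):
--     # Solution
--     count = 0
--     for i in range(2, len(S)+1):
--         cnt_0 = 0
--         cnt_1 = 0
--         substr = []
--         for j in range(0, i):
--             substr.append(S[j])
--             if S[j] == "0":
--                 cnt_0 += 1
--             else:
--                 cnt_1 += 1
--         if cnt_0 == cnt_1*cnt_1:
--             count += 1
--         for k in range(i, len(S)):
--             firstChar = substr[0]
--             curr_char = S[k]
--             if firstChar == "0":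
--                 cnt_0 -= 1
--             else:
--                 cnt_1 -= 1
--             if curr_char == "0":
--                 cnt_0 += 1
--             else:
--                 cnt_1 += 1
--             if cnt_0 == cnt_1*cnt_1:
--                 count += 1
--             substr.pop(0)
--             substr.append(curr_char)
--
--     return count
-- ===== SOURCE B (Python) =====
-- def Solution(S):
--     # A window has zeros == ones**2 iff its length L and ones count m satisfy
--     # L = m*m + m; so only lengths of that form (m >= 1, since L >= 2) can count.
--     # For each such m, slide a window of length m*m+m using a ones prefix-sum.
--     n = len(S)
--     pre = [0]
--     for c in S:
--         pre.append(pre[-1] + (0 if c == "0" else 1))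
--     count = 0
--     for m in range(1, n + 1):
--         L = m * m + m
--         if L <= n:
--             for j in range(0, n - L + 1):
--                 if pre[j + L] - pre[j] == m:
--                     count += 1
--     return count
-- ===== Notes on version B (the rewrite author's own statement) =====
-- stated objective: faster
-- what changed: A slides a window of every length 2..n updating counters and a substr list (pop(0) makes it cubic); B notes zeros == ones^2 forces the window length to be m*m+m, builds a ones prefix-sum once, and scans only the O(sqrt n) feasible lengths.
import Mathlib
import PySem

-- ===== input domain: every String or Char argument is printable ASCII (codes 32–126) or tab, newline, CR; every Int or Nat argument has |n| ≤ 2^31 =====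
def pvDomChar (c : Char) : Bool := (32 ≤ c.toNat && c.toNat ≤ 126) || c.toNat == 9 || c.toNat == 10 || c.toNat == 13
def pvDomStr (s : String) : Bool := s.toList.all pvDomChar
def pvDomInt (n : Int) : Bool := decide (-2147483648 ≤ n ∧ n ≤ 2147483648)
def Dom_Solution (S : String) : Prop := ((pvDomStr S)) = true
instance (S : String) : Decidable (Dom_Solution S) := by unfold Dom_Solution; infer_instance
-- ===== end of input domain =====

-- B replaces A's slide-a-window-of-every-length scan by a ones-prefix-sum scan over only
-- the window lengths of the form m*m+m (zeros = ones^2 forces the length to be m^2+m).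

-- ===== PORT A =====
-- body of A's first inner loop (build substr and the two counters over S[0:i])
def initStepA (cs : List Char) (st : Int × Int × List Char) (j : Int) : Int × Int × List Char :=
  let c := PySem.List.pyGetD cs j ' '
  let substr := st.2.2 ++ [c]
  if c = '0' then (st.1 + 1, st.2.1, substr) else (st.1, st.2.1 + 1, substr)

-- body of A's sliding loop (state = cnt_0, cnt_1, count, substr); substr.pop(0) = drop 1
def slideStepA (cs : List Char) (st : Int × Int × Int × List Char) (k : Int) :
    Int × Int × Int × List Char :=
  let firstChar := PySem.List.pyGetD st.2.2.2 0 ' '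
  let currChar := PySem.List.pyGetD cs k ' '
  let p := if firstChar = '0' then (st.1 - 1, st.2.1) else (st.1, st.2.1 - 1)
  let q := if currChar = '0' then (p.1 + 1, p.2) else (p.1, p.2 + 1)
  let count := if q.1 = q.2 * q.2 then st.2.2.1 + 1 else st.2.2.1
  (q.1, q.2, count, st.2.2.2.drop 1 ++ [currChar])

def Solution (S : String) : Int :=
  let cs := S.toList
  let n : Int := PySem.List.len cs
  (PySem.List.pyRange 2 (n + 1) 1).foldl (fun count i =>
    let s0 := (PySem.List.pyRange 0 i 1).foldl (initStepA cs) (0, 0, [])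
    let count1 := if s0.1 = s0.2.1 * s0.2.1 then count + 1 else count
    ((PySem.List.pyRange i n 1).foldl (slideStepA cs) (s0.1, s0.2.1, count1, s0.2.2)).2.2.1) 0

-- ===== PORT B =====
-- body of B's prefix-sum loop: pre.append(pre[-1] + (0 if c == "0" else 1))
def preStepB (pre : List Int) (c : Char) : List Int :=
  pre ++ [PySem.List.pyGetD pre (-1) 0 + (if c = '0' then 0 else 1)]

def Solution_alt (S : String) : Int :=
  let cs := S.toList
  let n : Int := PySem.List.len cs
  let pre := cs.foldl preStepB [0]
  (PySem.List.pyRange 1 (n + 1) 1).foldl (fun count m =>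
    let L := m * m + m
    if L ≤ n then
      (PySem.List.pyRange 0 (n - L + 1) 1).foldl (fun count j =>
        if PySem.List.pyGetD pre (j + L) 0 - PySem.List.pyGetD pre j 0 = m then count + 1
        else count) count
    else count) 0

-- ===== PRECONDITION & SPEC =====
def Spec_Solution (S : String) (out : Int) : Prop := out = Solution_alt S
instance (S : String) (out : Int) : Decidable (Spec_Solution S out) := by unfold Spec_Solution; infer_instance

-- ===== CLAIM (what is proved, stated in full; the proofs are below) =====
def Claim_equal_Solution : Prop := ∀ (S : String), Dom_Solution S → Spec_Solution S (Solution S)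

-- ===== LEMMAS AND PROOFS =====

-- zeros / ones counters of a window, the window itself, and the two counting functions
def zc (w : List Char) : ℕ := w.countP (fun c => c == '0')
def oc (w : List Char) : ℕ := w.countP (fun c => !(c == '0'))
def win (cs : List Char) (a L : ℕ) : List Char := (cs.drop a).take L
def goodb (cs : List Char) (a L : ℕ) : Bool :=
  zc (win cs a L) == oc (win cs a L) * oc (win cs a L)
-- number of windows of length L with zeros = ones^2 / with ones-count m
def Ncnt (cs : List Char) (L : ℕ) : ℕ :=
  (List.range (cs.length - L + 1)).countP (fun a => goodb cs a L)
def Mcnt (cs : List Char) (L m : ℕ) : ℕ :=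
  (List.range (cs.length - L + 1)).countP (fun a => oc (win cs a L) == m)

theorem zc_add_oc (w : List Char) : zc w + oc w = w.length := by
  unfold zc oc
  induction w with
  | nil => rfl
  | cons c w ih => by_cases h : c == '0' <;> simp [h] <;> omega

theorem length_win (cs : List Char) (a L : ℕ) (h : a + L ≤ cs.length) :
    (win cs a L).length = L := by
  simp [win]; omega

theorem win_cons (cs : List Char) (a L : ℕ) (hL : 1 ≤ L) (h : a < cs.length) :
    win cs a L = cs[a] :: win cs (a + 1) (L - 1) := by
  obtain ⟨k, rfl⟩ : ∃ k, L = k + 1 := ⟨L - 1, by omega⟩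
  unfold win
  rw [List.drop_eq_getElem_cons h]
  rw [List.take_succ_cons]
  simp

theorem win_snoc (cs : List Char) (a L : ℕ) (hL : 1 ≤ L) (h : a + L < cs.length) :
    win cs (a + 1) L = win cs (a + 1) (L - 1) ++ [cs[a + L]] := by
  obtain ⟨k, rfl⟩ : ∃ k, L = k + 1 := ⟨L - 1, by omega⟩
  unfold win
  rw [List.take_add, List.drop_drop,
    show a + 1 + k = a + (k + 1) by omega,
    List.drop_eq_getElem_cons (show a + (k + 1) < cs.length from h),
    List.take_succ_cons, List.take_zero]
  simp

theorem sq_add_inj (o m : ℕ) (h : o * o + o = m * m + m) : o = m := by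
  nlinarith

theorem initA_eq (cs : List Char) (t : ℕ) (ht : t ≤ cs.length) :
    (PySem.List.pyRange 0 (t : Int) 1).foldl (initStepA cs) (0, 0, []) =
      ((zc (cs.take t) : Int), (oc (cs.take t) : Int), cs.take t) := by
  induction t with
  | zero => simp [PySem.List.pyRange_one_eq_nil, zc, oc]
  | succ t ih =>
    have h1 : ((t : Int) + 1) = ((t + 1 : ℕ) : Int) := by push_cast; ring
    rw [← h1, PySem.List.pyRange_one_succ_right (by positivity), List.foldl_append,
      ih (by omega)]
    have htl : t < cs.length := by omega
    have hz : zc (cs.take t ++ [cs[t]]) = zc (cs.take t) + (if cs[t] = '0' then 1 else 0) := by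
      unfold zc; rw [List.countP_append]
      by_cases h : cs[t] = '0' <;> simp [h]
    have ho : oc (cs.take t ++ [cs[t]]) = oc (cs.take t) + (if cs[t] = '0' then 0 else 1) := by
      unfold oc; rw [List.countP_append]
      by_cases h : cs[t] = '0' <;> simp [h]
    rw [List.take_succ_eq_append_getElem htl, hz, ho]
    simp only [List.foldl_cons, List.foldl_nil, initStepA, PySem.List.pyGetD_natCast,
      List.getD_eq_getElem?_getD, List.getElem?_eq_getElem htl, Option.getD_some]
    by_cases h : cs[t] = '0' <;> simp only [h, if_true, if_false] <;>
      refine Prod.ext ?_ (Prod.ext ?_ rfl) <;> push_cast <;> ring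

theorem good_iff (cs : List Char) (a L : ℕ) :
    ((zc (win cs a L) : Int) = (oc (win cs a L) : Int) * (oc (win cs a L) : Int)) ↔
      goodb cs a L = true := by
  unfold goodb; rw [beq_iff_eq]; exact_mod_cast Iff.rfl

theorem slide_step (cs : List Char) (i t : ℕ) (hi : 1 ≤ i) (ht : i + t < cs.length) (C : Int) :
    slideStepA cs ((zc (win cs t i) : Int), (oc (win cs t i) : Int), C, win cs t i)
        ((i + t : ℕ) : Int) =
      ((zc (win cs (t + 1) i) : Int), (oc (win cs (t + 1) i) : Int),
        (if goodb cs (t + 1) i then C + 1 else C), win cs (t + 1) i) := by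
  have hwc : win cs t i = cs[t] :: win cs (t + 1) (i - 1) := win_cons cs t i hi (by omega)
  have hws : win cs (t + 1) i = win cs (t + 1) (i - 1) ++ [cs[t + i]] :=
    win_snoc cs t i hi (by omega)
  have h1 : PySem.List.pyGetD (win cs t i) 0 ' ' = cs[t] := by
    rw [hwc]; exact PySem.List.pyGetD_zero_cons _ _ _
  have h2 : PySem.List.pyGetD cs ((i + t : ℕ) : Int) ' ' = cs[t + i] := by
    rw [PySem.List.pyGetD_natCast, List.getD_eq_getElem?_getD,
      List.getElem?_eq_getElem (show i + t < cs.length from ht), Option.getD_some]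
    simp only [show i + t = t + i from by omega]
  have hzc : zc (win cs t i) = zc (win cs (t + 1) (i - 1)) + (if cs[t] = '0' then 1 else 0) := by
    rw [hwc]; unfold zc; rw [List.countP_cons]
    by_cases h : cs[t] = '0' <;> simp [h]
  have hoc : oc (win cs t i) = oc (win cs (t + 1) (i - 1)) + (if cs[t] = '0' then 0 else 1) := by
    rw [hwc]; unfold oc; rw [List.countP_cons]
    by_cases h : cs[t] = '0' <;> simp [h]
  have hzs : zc (win cs (t + 1) i) = zc (win cs (t + 1) (i - 1)) + (if cs[t + i] = '0' then 1 else 0) := by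
    rw [hws]; unfold zc; rw [List.countP_append]
    by_cases h : cs[t + i] = '0' <;> simp [h]
  have hos : oc (win cs (t + 1) i) = oc (win cs (t + 1) (i - 1)) + (if cs[t + i] = '0' then 0 else 1) := by
    rw [hws]; unfold oc; rw [List.countP_append]
    by_cases h : cs[t + i] = '0' <;> simp [h]
  have hdrop : (win cs t i).drop 1 ++ [cs[t + i]] = win cs (t + 1) i := by
    rw [hwc, hws]; simp
  by_cases ha : cs[t] = '0' <;> by_cases hb : cs[t + i] = '0'
  · rw [hb] at hdrop
    have EZ : (zc (win cs t i) : Int) - 1 + 1 = (zc (win cs (t + 1) i) : Int) := by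
      rw [hzc, hzs]; simp [ha, hb]
    have EO : (oc (win cs t i) : Int) = (oc (win cs (t + 1) i) : Int) := by
      rw [hoc, hos]; simp [ha, hb]
    simp only [slideStepA, h1, h2, ha, hb, if_true, if_false, hdrop]
    rw [EZ, EO, if_congr (good_iff cs (t + 1) i) rfl rfl]
  · have EZ : (zc (win cs t i) : Int) - 1 = (zc (win cs (t + 1) i) : Int) := by
      rw [hzc, hzs]; simp [ha, hb]
    have EO : (oc (win cs t i) : Int) + 1 = (oc (win cs (t + 1) i) : Int) := by
      rw [hoc, hos]; simp [ha, hb]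
    simp only [slideStepA, h1, h2, ha, hb, if_true, if_false, hdrop]
    rw [EZ, EO, if_congr (good_iff cs (t + 1) i) rfl rfl]
  · rw [hb] at hdrop
    have EZ : (zc (win cs t i) : Int) + 1 = (zc (win cs (t + 1) i) : Int) := by
      rw [hzc, hzs]; simp [ha, hb]
    have EO : (oc (win cs t i) : Int) - 1 = (oc (win cs (t + 1) i) : Int) := by
      rw [hoc, hos]; simp [ha, hb]
    simp only [slideStepA, h1, h2, ha, hb, if_true, if_false, hdrop]
    rw [EZ, EO, if_congr (good_iff cs (t + 1) i) rfl rfl]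
  · have EZ : (zc (win cs t i) : Int) = (zc (win cs (t + 1) i) : Int) := by
      rw [hzc, hzs]; simp [ha, hb]
    have EO : (oc (win cs t i) : Int) - 1 + 1 = (oc (win cs (t + 1) i) : Int) := by
      rw [hoc, hos]; simp [ha, hb]
    simp only [slideStepA, h1, h2, ha, hb, if_true, if_false, hdrop]
    rw [EZ, EO, if_congr (good_iff cs (t + 1) i) rfl rfl]

theorem slideA_eq (cs : List Char) (i : ℕ) (hi : 1 ≤ i) (c0 : Int) (t : ℕ)
    (ht : i + t ≤ cs.length) :
    ((List.range t).map (fun k => ((i + k : ℕ) : Int))).foldl (slideStepA cs)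
        ((zc (win cs 0 i) : Int), (oc (win cs 0 i) : Int), c0, win cs 0 i) =
      ((zc (win cs t i) : Int), (oc (win cs t i) : Int),
        c0 + ((List.range t).countP (fun a => goodb cs (a + 1) i) : Int), win cs t i) := by
  induction t with
  | zero => simp
  | succ t ih =>
    rw [List.range_succ, List.map_append, List.foldl_append, ih (by omega)]
    simp only [List.map_cons, List.map_nil, List.foldl_cons, List.foldl_nil]
    rw [slide_step cs i t hi (by omega)]
    rw [List.countP_append]
    by_cases h : goodb cs (t + 1) i <;> simp [h] <;> push_cast <;> ring

theorem bodyA_eq (cs : List Char) (count : Int) (i : Int)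
    (h2 : 2 ≤ i) (hn : i ≤ (cs.length : Int)) :
    ((PySem.List.pyRange i (cs.length : Int) 1).foldl (slideStepA cs)
        (((PySem.List.pyRange 0 i 1).foldl (initStepA cs) (0, 0, [])).1,
         ((PySem.List.pyRange 0 i 1).foldl (initStepA cs) (0, 0, [])).2.1,
         (if ((PySem.List.pyRange 0 i 1).foldl (initStepA cs) (0, 0, [])).1 =
             ((PySem.List.pyRange 0 i 1).foldl (initStepA cs) (0, 0, [])).2.1 *
             ((PySem.List.pyRange 0 i 1).foldl (initStepA cs) (0, 0, [])).2.1
          then count + 1 else count),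
         ((PySem.List.pyRange 0 i 1).foldl (initStepA cs) (0, 0, [])).2.2)).2.2.1
    = count + (Ncnt cs i.toNat : Int) := by
  obtain ⟨i', rfl⟩ : ∃ j : ℕ, i = (j : Int) := ⟨i.toNat, (Int.toNat_of_nonneg (by omega)).symm⟩
  have hlen : i' ≤ cs.length := by exact_mod_cast hn
  have htake : cs.take i' = win cs 0 i' := by simp [win]
  rw [initA_eq cs i' hlen]
  simp only [htake]
  have hr : PySem.List.pyRange (i' : Int) (cs.length : Int) 1 =
      (List.range (cs.length - i')).map (fun k => ((i' + k : ℕ) : Int)) := by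
    rw [PySem.List.pyRange_one]
    rw [show (((cs.length : Int)) - i').toNat = cs.length - i' from by omega]
    apply List.map_congr_left; intro k hk; push_cast; ring
  rw [hr, if_congr (good_iff cs 0 i') rfl rfl,
    slideA_eq cs i' (by omega) _ (cs.length - i') (by omega)]
  simp only [Int.toNat_natCast]
  unfold Ncnt
  rw [show cs.length - i' + 1 = (cs.length - i') + 1 from rfl, List.range_succ_eq_map,
    List.countP_cons, List.countP_map]
  by_cases h0 : goodb cs 0 i' <;>
    simp [h0, Function.comp_def, Nat.succ_eq_add_one] <;> push_cast <;> ring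

theorem Solution_eq_sum (S : String) :
    Solution S = ∑ k ∈ Finset.range (S.toList.length + 1 - 2), (Ncnt S.toList (2 + k) : Int) := by
  simp only [Solution, PySem.List.len_eq]
  refine Eq.trans (PySem.List.foldl_congr_mem _ _
      (fun count i => count + (Ncnt S.toList i.toNat : Int)) 0 ?_) ?_
  · intro acc x hx
    rw [PySem.List.mem_pyRange_one] at hx
    exact bodyA_eq S.toList acc x hx.1 (by omega)
  · rw [PySem.List.foldl_add _ (fun i : Int => (Ncnt S.toList i.toNat : Int)) 0]
    rw [PySem.List.pyRange_one, List.map_map]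
    rw [show (((S.toList.length : Int) + 1) - 2).toNat = S.toList.length + 1 - 2 from by omega]
    rw [List.map_congr_left (g := fun k => (Ncnt S.toList (2 + k) : Int))
      (by intro k hk
          simp only [Function.comp_def]
          rw [show ((2 : Int) + (k : Int)).toNat = 2 + k from by omega])]
    rw [zero_add]
    rfl

theorem preB_gen (cs : List Char) : ∀ (pref : List Char),
    cs.foldl preStepB ((List.range (pref.length + 1)).map (fun t => (oc (pref.take t) : Int))) =
      (List.range ((pref ++ cs).length + 1)).map (fun t => (oc ((pref ++ cs).take t) : Int)) := by
  induction cs with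
  | nil => intro pref; simp
  | cons c cs ih =>
    intro pref
    rw [List.foldl_cons]
    have hsplit : (List.range (pref.length + 1)).map (fun t => (oc (pref.take t) : Int)) =
        (List.range pref.length).map (fun t => (oc (pref.take t) : Int)) ++
          [(oc pref : Int)] := by
      rw [List.range_succ, List.map_append]; simp
    have hmap : (List.range (pref.length + 1)).map (fun t => (oc ((pref ++ [c]).take t) : Int)) =
        (List.range (pref.length + 1)).map (fun t => (oc (pref.take t) : Int)) := by
      apply List.map_congr_left
      intro t htm
      rw [List.mem_range] at htm
      rw [List.take_append_of_le_length (by omega)]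
    have hoc1 : oc (pref ++ [c]) = oc pref + (if c = '0' then 0 else 1) := by
      unfold oc; rw [List.countP_append]
      by_cases h : c = '0' <;> simp [h]
    have hstep : preStepB ((List.range (pref.length + 1)).map (fun t => (oc (pref.take t) : Int))) c =
        (List.range ((pref ++ [c]).length + 1)).map (fun t => (oc ((pref ++ [c]).take t) : Int)) := by
      unfold preStepB
      have hlast : PySem.List.pyGetD ((List.range (pref.length + 1)).map
          (fun t => (oc (pref.take t) : Int))) (-1) 0 = (oc pref : Int) := by
        rw [hsplit]; exact PySem.List.pyGetD_neg_one_append_singleton _ _ _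
      rw [hlast, show (pref ++ [c]).length = pref.length + 1 from by simp]
      rw [List.range_succ (n := pref.length + 1), List.map_append, hmap]
      congr 1
      simp only [List.map_cons, List.map_nil]
      rw [List.take_of_length_le (by simp), hoc1]
      by_cases h : c = '0' <;> simp [h] <;> push_cast <;> ring
    rw [hstep, ih (pref ++ [c])]
    simp [List.append_assoc]

theorem preB_eq (cs : List Char) :
    cs.foldl preStepB [0] =
      (List.range (cs.length + 1)).map (fun t => (oc (cs.take t) : Int)) := by
  have := preB_gen cs []
  simpa [oc] using this

theorem oc_take_add (cs : List Char) (k L : ℕ) :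
    oc (cs.take (k + L)) = oc (cs.take k) + oc (win cs k L) := by
  unfold oc win
  rw [List.take_add, List.countP_append]

theorem bodyB_eq (cs : List Char) (count : Int) (m : Int) (h1 : 1 ≤ m) :
    (if m * m + m ≤ (cs.length : Int) then
       (PySem.List.pyRange 0 ((cs.length : Int) - (m * m + m) + 1) 1).foldl (fun count j =>
         if PySem.List.pyGetD (cs.foldl preStepB [0]) (j + (m * m + m)) 0 -
             PySem.List.pyGetD (cs.foldl preStepB [0]) j 0 = m then count + 1
         else count) count
     else count) =
      count + (if m * m + m ≤ (cs.length : Int)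
        then (Mcnt cs (m * m + m).toNat m.toNat : Int) else 0) := by
  by_cases hL : m * m + m ≤ (cs.length : Int)
  · rw [if_pos hL, if_pos hL]
    obtain ⟨m', rfl⟩ : ∃ j : ℕ, m = (j : Int) := ⟨m.toNat, (Int.toNat_of_nonneg (by omega)).symm⟩
    have hcast : ((m' : Int) * m' + m') = ((m' * m' + m' : ℕ) : Int) := by push_cast; ring
    have hLn : m' * m' + m' ≤ cs.length := by exact_mod_cast hL
    rw [PySem.List.foldl_ite_add_one
      (p := fun j => PySem.List.pyGetD (cs.foldl preStepB [0]) (j + ((m' : Int) * m' + m')) 0 -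
             PySem.List.pyGetD (cs.foldl preStepB [0]) j 0 = (m' : Int))]
    congr 1
    rw [show ((cs.length : Int) - ((m' : Int) * m' + m') + 1) =
        ((cs.length - (m' * m' + m') + 1 : ℕ) : Int) from by push_cast; omega]
    rw [PySem.List.pyRange_one]
    rw [show ((((cs.length - (m' * m' + m') + 1 : ℕ)) : Int) - 0).toNat =
        cs.length - (m' * m' + m') + 1 from by omega]
    rw [List.countP_map]
    rw [show ((m' : Int) * m' + m').toNat = m' * m' + m' from by
      exact_mod_cast hcast ▸ Int.toNat_natCast _]
    rw [show ((m' : Int)).toNat = m' from Int.toNat_natCast _]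
    rw [List.countP_congr (q := fun a => oc (win cs a (m' * m' + m')) == m') ?_]
    · rfl
    · intro k hk
      rw [List.mem_range] at hk
      have hgj : PySem.List.pyGetD (cs.foldl preStepB [0]) ((0 : Int) + (k : Int)) 0 =
          (oc (cs.take k) : Int) := by
        rw [preB_eq, show ((0 : Int) + (k : Int)) = ((k : ℕ) : Int) from by push_cast; ring,
          PySem.List.pyGetD_natCast, PySem.List.getD_map_range _ _ _ _ (by omega)]
      have hgjL : PySem.List.pyGetD (cs.foldl preStepB [0])
          ((0 : Int) + (k : Int) + ((m' : Int) * m' + m')) 0 =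
          (oc (cs.take (k + (m' * m' + m'))) : Int) := by
        rw [preB_eq, show ((0 : Int) + (k : Int) + ((m' : Int) * m' + m')) =
            ((k + (m' * m' + m') : ℕ) : Int) from by push_cast; ring,
          PySem.List.pyGetD_natCast, PySem.List.getD_map_range _ _ _ _ (by omega)]
      simp only [Function.comp_def, hgj, hgjL, decide_eq_true_eq, beq_iff_eq]
      rw [oc_take_add]
      constructor
      · intro h; omega
      · intro h; omega
  · rw [if_neg hL, if_neg hL, add_zero]

theorem Solution_alt_eq_sum (S : String) :
    Solution_alt S = ∑ k ∈ Finset.range S.toList.length,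
        (if (1 + k) * (1 + k) + (1 + k) ≤ S.toList.length
          then (Mcnt S.toList ((1 + k) * (1 + k) + (1 + k)) (1 + k) : Int) else 0) := by
  simp only [Solution_alt, PySem.List.len_eq]
  refine Eq.trans (PySem.List.foldl_congr_mem _ _
      (fun count m => count + (if m * m + m ≤ (S.toList.length : Int)
        then (Mcnt S.toList (m * m + m).toNat m.toNat : Int) else 0)) 0 ?_) ?_
  · intro acc x hx
    rw [PySem.List.mem_pyRange_one] at hx
    exact bodyB_eq S.toList acc x hx.1
  · rw [PySem.List.foldl_add _ (fun m : Int => (if m * m + m ≤ (S.toList.length : Int)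
        then (Mcnt S.toList (m * m + m).toNat m.toNat : Int) else 0)) 0]
    rw [PySem.List.pyRange_one, List.map_map]
    rw [show (((S.toList.length : Int) + 1) - 1).toNat = S.toList.length from by omega]
    rw [List.map_congr_left (g := fun k : ℕ => (if (1 + k) * (1 + k) + (1 + k) ≤ S.toList.length
        then (Mcnt S.toList ((1 + k) * (1 + k) + (1 + k)) (1 + k) : Int) else 0)) ?_]
    · rw [zero_add]; rfl
    · intro k hk
      simp only [Function.comp_def]
      rw [show ((1 : Int) + (k : Int)) = ((1 + k : ℕ) : Int) from by push_cast; ring]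
      by_cases hcn : (1 + k) * (1 + k) + (1 + k) ≤ S.toList.length
      · rw [if_pos (by exact_mod_cast hcn), if_pos hcn]
        rw [show (((1 + k : ℕ) : Int) * ((1 + k : ℕ) : Int) + ((1 + k : ℕ) : Int)) =
          (((1 + k) * (1 + k) + (1 + k) : ℕ) : Int) from by push_cast; ring,
          Int.toNat_natCast, Int.toNat_natCast]
      · rw [if_neg (by exact_mod_cast hcn), if_neg hcn]

theorem good_iff_len (cs : List Char) (a L : ℕ) (hL : a + L ≤ cs.length) :
    goodb cs a L = true ↔ oc (win cs a L) * oc (win cs a L) + oc (win cs a L) = L := by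
  have hlen := length_win cs a L hL
  have hz := zc_add_oc (win cs a L)
  unfold goodb
  rw [beq_iff_eq]
  set q := oc (win cs a L) * oc (win cs a L)
  omega

theorem Ncnt_eq_Mcnt (cs : List Char) (m : ℕ) (h1 : 1 ≤ m) (hn : m * m + m ≤ cs.length) :
    Ncnt cs (m * m + m) = Mcnt cs (m * m + m) m := by
  unfold Ncnt Mcnt
  apply List.countP_congr
  intro a ha
  rw [List.mem_range] at ha
  rw [good_iff_len cs a (m * m + m) (by omega), beq_iff_eq]
  constructor
  · intro h; exact sq_add_inj _ _ h
  · intro h; rw [h]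

theorem Ncnt_eq_zero (cs : List Char) (L : ℕ) (h2 : 2 ≤ L) (hn : L ≤ cs.length)
    (h : ∀ m, m * m + m ≠ L) : Ncnt cs L = 0 := by
  unfold Ncnt
  rw [List.countP_eq_zero]
  intro a ha
  rw [List.mem_range] at ha
  intro hg
  rw [good_iff_len cs a L (by omega)] at hg
  exact h (oc (win cs a L)) hg

theorem sum_swap (cs : List Char) :
    (∑ k ∈ Finset.range (cs.length + 1 - 2), (Ncnt cs (2 + k) : Int)) =
      ∑ k ∈ Finset.range cs.length,
        (if (1 + k) * (1 + k) + (1 + k) ≤ cs.length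
          then (Mcnt cs ((1 + k) * (1 + k) + (1 + k)) (1 + k) : Int) else 0) := by
  have lhs := Finset.sum_Ico_eq_sum_range (f := fun L => (Ncnt cs L : Int)) (m := 2)
    (n := cs.length + 1)
  have rhs := Finset.sum_Ico_eq_sum_range
    (f := fun m => (if m * m + m ≤ cs.length then (Mcnt cs (m * m + m) m : Int) else 0))
    (m := 1) (n := cs.length + 1)
  simp only [Nat.add_sub_cancel] at rhs
  rw [← lhs, ← rhs]
  rw [← Finset.sum_filter]
  have hMN : ∑ m ∈ (Finset.Ico 1 (cs.length + 1)).filter (fun m => m * m + m ≤ cs.length),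
      (Mcnt cs (m * m + m) m : Int) =
      ∑ m ∈ (Finset.Ico 1 (cs.length + 1)).filter (fun m => m * m + m ≤ cs.length),
      (Ncnt cs (m * m + m) : Int) := by
    apply Finset.sum_congr rfl
    intro m hm
    rw [Finset.mem_filter, Finset.mem_Ico] at hm
    rw [Ncnt_eq_Mcnt cs m (by omega) hm.2]
  rw [hMN]
  have himg : ∑ L ∈ ((Finset.Ico 1 (cs.length + 1)).filter
        (fun m => m * m + m ≤ cs.length)).image (fun m => m * m + m),
      (Ncnt cs L : Int) =
      ∑ m ∈ (Finset.Ico 1 (cs.length + 1)).filter (fun m => m * m + m ≤ cs.length),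
      (Ncnt cs (m * m + m) : Int) := by
    apply Finset.sum_image
    intro x hx y hy hxy
    exact sq_add_inj x y hxy
  rw [← himg]
  apply (Finset.sum_subset ?_ ?_).symm
  · intro L hL
    rw [Finset.mem_image] at hL
    obtain ⟨m, hm, rfl⟩ := hL
    rw [Finset.mem_filter, Finset.mem_Ico] at hm
    rw [Finset.mem_Ico]
    constructor
    · nlinarith [hm.1.1]
    · omega
  · intro L hL hnot
    rw [Finset.mem_Ico] at hL
    have : ∀ m, m * m + m ≠ L := by
      intro m hm
      apply hnot
      rw [Finset.mem_image]
      refine ⟨m, ?_, hm⟩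
      rw [Finset.mem_filter, Finset.mem_Ico]
      refine ⟨⟨by nlinarith [hL.1], by omega⟩, by omega⟩
    rw [Ncnt_eq_zero cs L hL.1 (by omega) this]
    rfl

-- ===== VERDICT (by name: the statement is the Claim_ definition above) =====
theorem Solution_spec : Claim_equal_Solution := by
  intro S _
  unfold Spec_Solution
  rw [Solution_eq_sum, Solution_alt_eq_sum, sum_swap]
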